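-- pv_equiv track=rewrite | github.com/DmitriyMikhalev/Algorithms | another algorithms/sum_numeral_system.py | sum_numeral_sys
-- ===== SOURCE A (Python) =====
-- def sum_numeral_sys(a: str, b: str, base: int = 2) -> list[int]:
--     """
--     Get solution to the problem.
--     Required params:
--         a: str -- first num.
--         b: str -- second num.
--     Optional params:
--         base: int (by default is 2) -- base of numeral system.
--     Returns list[int] -- list with sum of the numbers.
--
--     Algorithm:
--     1. Create an empty array for result num.
--        Create 2 arrays with digits of numbers. If numbers have different count
--        of digits smallest number is completing with insignificant zeros.
--        Create overflow variable (at start is 0).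
--
--     2. Check that the numbers don't contain digits greater or equal to base.
--
--     3. Bypass the given array by linear traversal from end to start:
--        Sum digits and overflow at this index as 'value'.
--        Set overflow to integer value of 'value' divided by base.
--        Add the remainder of dividing 'value' by base
--
--        For example, if base is 10: a = 19 [1, 9], b = 3 [3].
--        By steps: numbers are [1, 9] and [0, 3], overflow is 0.
--        value = 9 + 3 + 0 = 12
--        overflow = 12 // 10 = 1 (will be transmitted to next digits)
--        result = 12 % 10 = 2 (result of summing digits)
--
--     4. If overflow is not 0, we need to add new digit at a result number.
--
--     5. Reverse the created array (it was created from end to start) and return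
--        it.
--     """
--     res = []
--     max_len = max(len(a), len(b))
--     a = [int(i) for i in a.zfill(max_len)]
--     b = [int(i) for i in b.zfill(max_len)]
--
--     if any(i >= base for i in a) or any(i >= base for i in b):
--         raise ValueError('Incorrect base: number has digit >= base!')
--
--     overflow = 0
--     for i in range(max_len - 1, -1, -1):
--         digits_sum = overflow + a[i] + b[i]
--         overflow = digits_sum // base
--         res.append(digits_sum % base)
--
--     if overflow:
--         res.append(overflow)
--
--     return res[::-1]
-- ===== SOURCE B (Python) =====
-- def sum_numeral_sys(a: str, b: str, base: int = 2) -> list[int]: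
--     max_len = max(len(a), len(b))
--     a = [int(i) for i in a.zfill(max_len)]
--     b = [int(i) for i in b.zfill(max_len)]
--
--     if any(i >= base for i in a) or any(i >= base for i in b):
--         raise ValueError('Incorrect base: number has digit >= base!')
--
--     # Horner-evaluate the (aligned) digit pairs into one integer sum.
--     n = 0
--     for x, y in zip(a, b):
--         n = n * base + x + y
--
--     # Reconstruct base-`base` digits, preserving width max_len.
--     digits = []
--     while n:
--         digits.append(n % base)
--         n //= base
--     digits += [0] * (max_len - len(digits))
--     return digits[::-1]
-- ===== Notes on version B (the rewrite author's own statement) =====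
-- stated objective: alternative
-- what changed: Replaces the index-driven right-to-left carry loop with Horner evaluation of the aligned digit pairs into a single integer, then reconstructs the result digits with a divmod loop and left-pads to max_len.
import Mathlib
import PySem

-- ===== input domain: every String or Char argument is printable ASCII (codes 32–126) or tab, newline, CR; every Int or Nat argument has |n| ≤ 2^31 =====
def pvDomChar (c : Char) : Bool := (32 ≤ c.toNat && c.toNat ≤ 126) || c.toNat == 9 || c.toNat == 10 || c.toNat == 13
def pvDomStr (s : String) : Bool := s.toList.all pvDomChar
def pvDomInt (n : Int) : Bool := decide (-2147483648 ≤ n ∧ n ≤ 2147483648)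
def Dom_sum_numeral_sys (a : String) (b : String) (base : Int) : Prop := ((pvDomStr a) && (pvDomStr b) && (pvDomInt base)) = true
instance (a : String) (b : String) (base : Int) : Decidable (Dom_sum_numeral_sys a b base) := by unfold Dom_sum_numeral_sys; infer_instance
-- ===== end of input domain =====

-- B replaces A's index-driven carry loop by Horner-evaluating the aligned digit pairs into one
-- integer and reconstructing its base-`base` digits with a divmod loop (objective: alternative
-- algorithm of similar cost); return values agree on all of Pre_ (the inputs where A raises no
-- exception); neither implementation mutates its arguments.

-- ===== PORT A =====
def sum_numeral_sys (a : String) (b : String) (base : Int) : List Int :=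
  -- max_len = max(len(a), len(b)); a = [int(i) for i in a.zfill(max_len)]; likewise b
  let max_len : Int := max (PySem.Str.len a) (PySem.Str.len b)
  let da : List Int := (PySem.Chars.zfill a.toList max_len).map (fun c => (PySem.Int.ofChars? [c]).getD 0)
  let db : List Int := (PySem.Chars.zfill b.toList max_len).map (fun c => (PySem.Int.ofChars? [c]).getD 0)
  if da.any (fun i => base ≤ i) || db.any (fun i => base ≤ i) then
    []  -- raise ValueError: excluded by Pre_sum_numeral_sys
  else
    -- for i in range(max_len - 1, -1, -1): digits_sum = overflow + a[i] + b[i]; …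
    let st : Int × List Int :=
      (PySem.List.pyRange (max_len - 1) (-1) (-1)).foldl
        (fun (st : Int × List Int) i =>
          let digits_sum := st.1 + PySem.List.pyGetD da i 0 + PySem.List.pyGetD db i 0
          (PySem.Int.floordiv digits_sum base, st.2 ++ [PySem.Int.mod digits_sum base]))
        (0, [])
    let res : List Int := if st.1 ≠ 0 then st.2 ++ [st.1] else st.2
    (PySem.List.slice? res none none (-1)).getD []  -- res[::-1]

-- ===== PORT B =====
-- `while n: digits.append(n % base); n //= base`, ported with a fuel bound (n.toNat suffices:
-- each iteration at least halves n) so the recursion is structural and kernel-reducible.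
-- The Python loop is only reached with n ≥ 0, and for base ≤ 1 only with n = 0, so the
-- strengthened guard agrees with Python's `n != 0` wherever the loop actually runs.
def pvToDigitsAux : Nat → Int → Int → List Int
  | 0, _, _ => []
  | fuel + 1, n, base =>
    if 0 < n ∧ 1 < base then
      PySem.Int.mod n base :: pvToDigitsAux fuel (PySem.Int.floordiv n base) base
    else []

def pvToDigits (n : Int) (base : Int) : List Int :=
  pvToDigitsAux n.toNat n base

def sum_numeral_sys_alt (a : String) (b : String) (base : Int) : List Int :=
  let max_len : Int := max (PySem.Str.len a) (PySem.Str.len b)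
  let da : List Int := (PySem.Chars.zfill a.toList max_len).map (fun c => (PySem.Int.ofChars? [c]).getD 0)
  let db : List Int := (PySem.Chars.zfill b.toList max_len).map (fun c => (PySem.Int.ofChars? [c]).getD 0)
  if da.any (fun i => base ≤ i) || db.any (fun i => base ≤ i) then
    []  -- raise ValueError: excluded by Pre_sum_numeral_sys
  else
    -- n = 0; for x, y in zip(a, b): n = n * base + x + y
    let n : Int := (da.zip db).foldl (fun acc p => acc * base + p.1 + p.2) 0
    -- digits = []; while n: digits.append(n % base); n //= base
    let digits : List Int := pvToDigits n base
    -- digits += [0] * (max_len - len(digits)); return digits[::-1]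
    let digits2 : List Int := digits ++ List.replicate ((max_len - (digits.length : Int)).toNat) 0
    digits2.reverse

-- ===== PRECONDITION & SPEC =====
-- Pre_ excludes exactly the inputs on which A raises: a character that is not a decimal digit
-- '0'..'9' (codes 48–57; ValueError from int), a digit with value ≥ base (the explicit
-- ValueError), and base < 1 with a nonempty input (the zero padding digit is then ≥ base:
-- ValueError; base = 0 would also hit //0).
def Pre_sum_numeral_sys (a : String) (b : String) (base : Int) : Prop :=
  ((a.toList.all fun c => 48 ≤ c.toNat && c.toNat ≤ 57 && decide ((c.toNat : Int) - 48 < base)) &&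
   (b.toList.all fun c => 48 ≤ c.toNat && c.toNat ≤ 57 && decide ((c.toNat : Int) - 48 < base)) &&
   (1 ≤ base || (a.toList.isEmpty && b.toList.isEmpty))) = true
instance (a : String) (b : String) (base : Int) : Decidable (Pre_sum_numeral_sys a b base) := by
  unfold Pre_sum_numeral_sys; infer_instance

def pvWitness_sum_numeral_sys : String × String × Int := ("19", "3", 10)

def Spec_sum_numeral_sys (a : String) (b : String) (base : Int) (out : List Int) : Prop := out = sum_numeral_sys_alt a b base
instance (a : String) (b : String) (base : Int) (out : List Int) : Decidable (Spec_sum_numeral_sys a b base out) := by unfold Spec_sum_numeral_sys; infer_instance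

-- ===== CLAIM (what is proved, stated in full; the proofs are below) =====
def Claim_equal_sum_numeral_sys : Prop := ∀ (a : String) (b : String) (base : Int), Dom_sum_numeral_sys a b base → Pre_sum_numeral_sys a b base → Spec_sum_numeral_sys a b base (sum_numeral_sys a b base)

-- ===== LEMMAS AND PROOFS =====

-- A's carry loop, recast structurally: LSB-first list of aligned digit pairs, incoming carry;
-- returns (digits produced by the loop (LSB first), final overflow).
def pvCarry (base : Int) : List (Int × Int) → Int → List Int × Int
  | [], c => ([], c)
  | p :: t, c =>
    let s := c + p.1 + p.2
    let r := pvCarry base t (PySem.Int.floordiv s base)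
    (PySem.Int.mod s base :: r.1, r.2)

-- value of an LSB-first pair list
def pvVal (base : Int) : List (Int × Int) → Int
  | [] => 0
  | p :: t => p.1 + p.2 + base * pvVal base t

def pvDigitChars : List Char := ['0', '1', '2', '3', '4', '5', '6', '7', '8', '9']

theorem pvChar_digit_mem (c : Char) (h1 : 48 ≤ c.toNat) (h2 : c.toNat ≤ 57) :
    c ∈ pvDigitChars := by
  have hco : Char.ofNat c.toNat = c := Char.ofNat_toNat c
  interval_cases h : c.toNat <;> rw [← hco] <;> decide

theorem pvToDigitsAux_nil (fuel : Nat) (n base : Int) (h : ¬(0 < n ∧ 1 < base)) :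
    pvToDigitsAux fuel n base = [] := by
  cases fuel with
  | zero => rfl
  | succ k => rw [pvToDigitsAux, if_neg h]

theorem pvFloordiv_toNat_lt (n base : Int) (h1 : 0 < n) (h2 : 1 < base) :
    (PySem.Int.floordiv n base).toNat < n.toNat := by
  rw [PySem.Int.floordiv_eq_ediv_of_pos (by omega)]
  have hlt : n / base < n := by rw [Int.ediv_lt_iff_lt_mul (by omega)]; nlinarith
  have hge : 0 ≤ n / base := Int.ediv_nonneg (by omega) (by omega)
  omega

theorem pvToDigitsAux_irrel (fuel1 : Nat) : ∀ (fuel2 : Nat) (n base : Int),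
    n.toNat ≤ fuel1 → n.toNat ≤ fuel2 →
    pvToDigitsAux fuel1 n base = pvToDigitsAux fuel2 n base := by
  induction fuel1 with
  | zero =>
    intro fuel2 n base h1 h2
    rw [pvToDigitsAux_nil 0 n base (by omega), pvToDigitsAux_nil fuel2 n base (by omega)]
  | succ k ih =>
    intro fuel2 n base h1 h2
    by_cases hc : 0 < n ∧ 1 < base
    · cases fuel2 with
      | zero => omega
      | succ m =>
        rw [pvToDigitsAux, pvToDigitsAux, if_pos hc, if_pos hc]
        have hlt := pvFloordiv_toNat_lt n base hc.1 hc.2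
        rw [ih m (PySem.Int.floordiv n base) base (by omega) (by omega)]
    · rw [pvToDigitsAux_nil _ _ _ hc, pvToDigitsAux_nil _ _ _ hc]

-- the Python loop's unfolding equation for pvToDigits
theorem pvToDigits_eq (n base : Int) :
    pvToDigits n base =
      if 0 < n ∧ 1 < base then
        PySem.Int.mod n base :: pvToDigits (PySem.Int.floordiv n base) base
      else [] := by
  by_cases hc : 0 < n ∧ 1 < base
  · rw [if_pos hc]
    unfold pvToDigits
    have hn1 : 1 ≤ n.toNat := by omega
    obtain ⟨k, hk⟩ : ∃ k, n.toNat = k + 1 := ⟨n.toNat - 1, by omega⟩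
    rw [hk, pvToDigitsAux, if_pos hc]
    have hlt := pvFloordiv_toNat_lt n base hc.1 hc.2
    rw [pvToDigitsAux_irrel k (PySem.Int.floordiv n base).toNat
      (PySem.Int.floordiv n base) base (by omega) (le_refl _)]
  · rw [if_neg hc]
    exact pvToDigitsAux_nil _ _ _ hc

theorem pvParse_digit (c : Char) (h : c ∈ pvDigitChars) :
    (PySem.Int.ofChars? [c]).getD 0 = (c.toNat : Int) - 48 := by
  simp only [pvDigitChars, List.mem_cons, List.not_mem_nil, or_false] at h
  rcases h with h | h | h | h | h | h | h | h | h | h <;> subst h <;> decide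

theorem pvZfill_mem (cs : List Char) (w : Int) (x : Char) (h : x ∈ PySem.Chars.zfill cs w) :
    x = '0' ∨ x ∈ cs := by
  unfold PySem.Chars.zfill at h
  split at h
  · exact Or.inr h
  · cases cs with
    | nil => simp [List.mem_replicate] at h; exact Or.inl h.2
    | cons c rest =>
      split at h
      next d tail heq =>
        injection heq with h1 h2
        subst h1; subst h2
        split at h
        · rcases List.mem_cons.1 h with h | h
          · exact Or.inr (by simp [h])
          · rcases List.mem_append.1 h with h | h
            · exact Or.inl (List.eq_of_mem_replicate h)
            · exact Or.inr (by simp [h])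
        · rcases List.mem_append.1 h with h | h
          · exact Or.inl (List.eq_of_mem_replicate h)
          · exact Or.inr h
      next heq => exact absurd heq (by simp)

theorem pvVal_nonneg (base : Int) (ps : List (Int × Int))
    (h : ∀ p ∈ ps, 0 ≤ p.1 ∧ p.1 < base ∧ 0 ≤ p.2 ∧ p.2 < base) (hb : 0 < base) :
    0 ≤ pvVal base ps ∧ pvVal base ps ≤ 2 * (base ^ ps.length - 1) := by
  induction ps with
  | nil => simp [pvVal]
  | cons p t ih =>
    have hp := h p (by simp)
    have ht := ih (fun q hq => h q (by simp [hq]))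
    have hpow : (1 : Int) ≤ base ^ t.length := one_le_pow₀ hb
    simp only [pvVal, List.length_cons, pow_succ]
    constructor
    · nlinarith [ht.1, hp.1, hp.2.2.1]
    · nlinarith [ht.2, hp.2.1, hp.2.2.2]

theorem pvVal_append (base : Int) (u : List (Int × Int)) (p : Int × Int) :
    pvVal base (u ++ [p]) = pvVal base u + (p.1 + p.2) * base ^ u.length := by
  induction u with
  | nil => simp [pvVal]
  | cons q t ih => simp [pvVal, ih, pow_succ]; ring

theorem pvHorner (base : Int) (l : List (Int × Int)) (acc : Int) :
    l.foldl (fun acc p => acc * base + p.1 + p.2) acc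
      = acc * base ^ l.length + pvVal base l.reverse := by
  induction l generalizing acc with
  | nil => simp [pvVal]
  | cons p t ih =>
    simp only [List.foldl_cons, List.reverse_cons, ih, pvVal_append, List.length_reverse,
      List.length_cons, pow_succ]
    ring

theorem pvCarry_spec (base : Int) (hb : 0 < base) (ps : List (Int × Int)) (c : Int) :
    (pvCarry base ps c).1
        = (List.range ps.length).map (fun j => (c + pvVal base ps) / base ^ j % base)
      ∧ (pvCarry base ps c).2 = (c + pvVal base ps) / base ^ ps.length := by
  induction ps generalizing c with
  | nil => simp [pvCarry, pvVal]
  | cons p t ih =>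
    have hN : c + pvVal base (p :: t) = (c + p.1 + p.2) + base * pvVal base t := by
      simp [pvVal]; ring
    have hfd : PySem.Int.floordiv (c + p.1 + p.2) base = (c + p.1 + p.2) / base :=
      PySem.Int.floordiv_eq_ediv_of_pos hb
    have hmd : PySem.Int.mod (c + p.1 + p.2) base = (c + p.1 + p.2) % base :=
      PySem.Int.mod_eq_emod_of_pos hb
    have key : (c + pvVal base (p :: t)) / base
        = (c + p.1 + p.2) / base + pvVal base t := by
      rw [hN, Int.add_mul_ediv_left _ _ (by omega : base ≠ 0)]
    have keym : (c + pvVal base (p :: t)) % base = (c + p.1 + p.2) % base := by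
      rw [hN, Int.add_mul_emod_self_left]
    have iht := ih (PySem.Int.floordiv (c + p.1 + p.2) base)
    constructor
    · simp only [pvCarry, List.length_cons, List.range_succ_eq_map, List.map_cons, List.map_map]
      congr 1
      · rw [hmd, pow_zero, Int.ediv_one, keym]
      · rw [iht.1]
        apply List.map_congr_left
        intro j _
        simp only [Function.comp_apply]
        rw [hfd, ← key, pow_succ', ← Int.ediv_ediv_of_nonneg (by omega : (0:Int) ≤ base)]
    · simp only [pvCarry, List.length_cons]
      rw [iht.2, hfd, ← key, pow_succ', ← Int.ediv_ediv_of_nonneg (by omega : (0:Int) ≤ base)]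

-- A's index loop equals pvCarry on the reversed zip.
theorem pvLoopA (base : Int) (da db : List Int) (h : db.length = da.length) (c : Int)
    (acc : List Int) :
    (PySem.List.pyRange ((da.length : Int) - 1) (-1) (-1)).foldl
        (fun (st : Int × List Int) i =>
          (PySem.Int.floordiv (st.1 + PySem.List.pyGetD da i 0 + PySem.List.pyGetD db i 0) base,
           st.2 ++ [PySem.Int.mod (st.1 + PySem.List.pyGetD da i 0 + PySem.List.pyGetD db i 0) base]))
        (c, acc)
      = ((pvCarry base ((da.zip db).reverse) c).2,
         acc ++ (pvCarry base ((da.zip db).reverse) c).1) := by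
  induction da using List.reverseRecOn generalizing db c acc with
  | nil =>
    have hdb : db = [] := List.eq_nil_of_length_eq_zero h
    subst hdb
    simp [PySem.List.pyRange_neg_one_eq_nil (by norm_num : ((0:Int) - 1) ≤ -1), pvCarry]
  | append_singleton das x ih =>
    rcases List.eq_nil_or_concat db with hdb | ⟨dbs, y, hdb⟩
    · subst hdb; simp at h
    rw [List.concat_eq_append] at hdb
    subst hdb
    have hlen : dbs.length = das.length := by simpa using h
    have hcons : PySem.List.pyRange (((das ++ [x]).length : Int) - 1) (-1) (-1)
        = (das.length : Int) :: PySem.List.pyRange ((das.length : Int) - 1) (-1) (-1) := by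
      have := PySem.List.pyRange_neg_one_cons
        (a := ((das ++ [x]).length : Int) - 1) (b := -1) (by simp; omega)
      simpa using this
    rw [hcons]
    simp only [List.foldl_cons]
    have hgx : PySem.List.pyGetD (das ++ [x]) ((das.length : Nat) : Int) 0 = x := by
      rw [PySem.List.pyGetD_natCast]; simp
    have hgy : PySem.List.pyGetD (dbs ++ [y]) ((das.length : Nat) : Int) 0 = y := by
      rw [PySem.List.pyGetD_natCast, ← hlen]; simp
    rw [hgx, hgy]
    have hcong : (PySem.List.pyRange ((das.length : Int) - 1) (-1) (-1)).foldl
        (fun (st : Int × List Int) i =>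
          (PySem.Int.floordiv (st.1 + PySem.List.pyGetD (das ++ [x]) i 0 + PySem.List.pyGetD (dbs ++ [y]) i 0) base,
           st.2 ++ [PySem.Int.mod (st.1 + PySem.List.pyGetD (das ++ [x]) i 0 + PySem.List.pyGetD (dbs ++ [y]) i 0) base]))
        (PySem.Int.floordiv (c + x + y) base, acc ++ [PySem.Int.mod (c + x + y) base])
      = (PySem.List.pyRange ((das.length : Int) - 1) (-1) (-1)).foldl
        (fun (st : Int × List Int) i =>
          (PySem.Int.floordiv (st.1 + PySem.List.pyGetD das i 0 + PySem.List.pyGetD dbs i 0) base,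
           st.2 ++ [PySem.Int.mod (st.1 + PySem.List.pyGetD das i 0 + PySem.List.pyGetD dbs i 0) base]))
        (PySem.Int.floordiv (c + x + y) base, acc ++ [PySem.Int.mod (c + x + y) base]) := by
      apply PySem.List.foldl_congr_mem
      intro st i hi
      have hmem := (PySem.List.mem_pyRange_neg_one (x := i)).1 hi
      have h0 : 0 ≤ i := by omega
      obtain ⟨k, rfl⟩ := Int.eq_ofNat_of_zero_le h0
      have hk : k < das.length := by omega
      have e1 : PySem.List.pyGetD (das ++ [x]) (k : Int) 0 = PySem.List.pyGetD das (k : Int) 0 := by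
        rw [PySem.List.pyGetD_natCast, PySem.List.pyGetD_natCast,
          List.getD_eq_getElem?_getD, List.getD_eq_getElem?_getD, List.getElem?_append_left hk]
      have e2 : PySem.List.pyGetD (dbs ++ [y]) (k : Int) 0 = PySem.List.pyGetD dbs (k : Int) 0 := by
        rw [PySem.List.pyGetD_natCast, PySem.List.pyGetD_natCast,
          List.getD_eq_getElem?_getD, List.getD_eq_getElem?_getD,
          List.getElem?_append_left (by omega : k < dbs.length)]
      rw [e1, e2]
    rw [hcong, ih dbs hlen]
    have hzip : (das ++ [x]).zip (dbs ++ [y]) = das.zip dbs ++ [(x, y)] :=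
      List.zip_append (by omega)
    rw [hzip]
    simp only [List.reverse_append, List.reverse_cons, List.reverse_nil, List.nil_append,
      List.singleton_append, pvCarry, List.append_assoc]

-- digits of N when N < base^n, padded to width n
theorem pvToDigits_pad (base : Int) (hb : 0 < base) (n : Nat) :
    ∀ N : Int, 0 ≤ N → N < base ^ n →
      pvToDigits N base ++ List.replicate (n - (pvToDigits N base).length) 0
        = (List.range n).map (fun j => N / base ^ j % base) := by
  induction n with
  | zero =>
    intro N h0 h1
    have : N = 0 := by simp at h1; omega
    subst this
    rw [pvToDigits_eq, if_neg (by omega)]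
    simp
  | succ m ih =>
    intro N h0 h1
    by_cases hN : N = 0
    · subst hN
      rw [pvToDigits_eq, if_neg (by omega)]
      simp only [List.nil_append, List.length_nil, Nat.sub_zero]
      apply List.ext_getElem (by simp)
      intro i h1' h2'
      simp
    · have hNpos : 0 < N := by omega
      have hb2 : 1 < base := by
        by_contra hc
        have hbe : base = 1 := by omega
        rw [hbe] at h1; simp at h1; omega
      rw [pvToDigits_eq, if_pos ⟨hNpos, hb2⟩]
      have hfd : PySem.Int.floordiv N base = N / base := PySem.Int.floordiv_eq_ediv_of_pos hb
      have hmd : PySem.Int.mod N base = N % base := PySem.Int.mod_eq_emod_of_pos hb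
      have hdivlt : N / base < base ^ m := by
        rw [Int.ediv_lt_iff_lt_mul hb, ← pow_succ]; exact h1
      have hdiv0 : 0 ≤ N / base := Int.ediv_nonneg h0 (by omega)
      have iht := ih (N / base) hdiv0 hdivlt
      rw [hfd, hmd]
      simp only [List.length_cons, List.cons_append, Nat.succ_sub_succ]
      rw [List.range_succ_eq_map, List.map_cons, List.map_map]
      congr 1
      · simp
      · rw [iht]
        apply List.map_congr_left
        intro j _
        simp only [Function.comp_apply]
        rw [pow_succ', ← Int.ediv_ediv_of_nonneg (by omega : (0:Int) ≤ base)]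

-- digits of N when base^n ≤ N < 2·base^n: width n+1, top digit 1
theorem pvToDigits_top (base : Int) (hb : 1 < base) (n : Nat) :
    ∀ N : Int, base ^ n ≤ N → N < 2 * base ^ n →
      pvToDigits N base = (List.range n).map (fun j => N / base ^ j % base) ++ [1] := by
  induction n with
  | zero =>
    intro N h0 h1
    have hN1 : N = 1 := by simp at h0 h1; omega
    subst hN1
    rw [pvToDigits_eq, if_pos ⟨by norm_num, hb⟩]
    have e1 : PySem.Int.floordiv 1 base = 0 := by
      rw [PySem.Int.floordiv_eq_ediv_of_pos (by omega)]
      exact Int.ediv_eq_zero_of_lt (by norm_num) hb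
    have e2 : PySem.Int.mod 1 base = 1 := by
      rw [PySem.Int.mod_eq_emod_of_pos (by omega)]
      exact Int.emod_eq_of_lt (by norm_num) hb
    rw [e1, e2, pvToDigits_eq, if_neg (by omega)]
    simp
  | succ m ih =>
    intro N h0 h1
    have hpow : (0:Int) < base ^ m := pow_pos (by omega) m
    have hNpos : 0 < N := by
      have : (0:Int) < base ^ (m+1) := pow_pos (by omega) (m+1)
      omega
    rw [pvToDigits_eq, if_pos ⟨hNpos, hb⟩]
    have hfd : PySem.Int.floordiv N base = N / base := PySem.Int.floordiv_eq_ediv_of_pos (by omega)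
    have hmd : PySem.Int.mod N base = N % base := PySem.Int.mod_eq_emod_of_pos (by omega)
    have hlo : base ^ m ≤ N / base := by
      rw [Int.le_ediv_iff_mul_le (by omega), ← pow_succ]; exact h0
    have hhi : N / base < 2 * base ^ m := by
      rw [Int.ediv_lt_iff_lt_mul (by omega)]
      calc N < 2 * base ^ (m+1) := h1
        _ = 2 * base ^ m * base := by ring
    have iht := ih (N / base) hlo hhi
    rw [hfd, hmd, iht]
    rw [List.range_succ_eq_map, List.map_cons, List.map_map]
    simp only [pow_zero, Int.ediv_one, List.cons_append]
    congr 2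
    apply List.map_congr_left
    intro j _
    simp only [Function.comp_apply]
    rw [pow_succ', ← Int.ediv_ediv_of_nonneg (by omega : (0:Int) ≤ base)]

theorem pvMain (a : String) (b : String) (base : Int)
    (hpre : Pre_sum_numeral_sys a b base) :
    sum_numeral_sys a b base = sum_numeral_sys_alt a b base := by
  unfold Pre_sum_numeral_sys at hpre
  simp only [Bool.and_eq_true, List.all_eq_true, Bool.or_eq_true, decide_eq_true_eq,
    List.isEmpty_iff] at hpre
  obtain ⟨⟨hda', hdb'⟩, hcase⟩ := hpre
  rcases hcase with hb1 | ⟨hae, hbe⟩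
  · -- base ≥ 1
    have hb : 0 < base := by omega
    have hml : max (PySem.Str.len a) (PySem.Str.len b)
        = ((max a.toList.length b.toList.length : Nat) : Int) := by
      rw [PySem.Str.len_eq, PySem.Str.len_eq, Nat.cast_max]
    set n : Nat := max a.toList.length b.toList.length with hn
    set da : List Int :=
      (PySem.Chars.zfill a.toList (n : Int)).map (fun c => (PySem.Int.ofChars? [c]).getD 0) with hda
    set db : List Int :=
      (PySem.Chars.zfill b.toList (n : Int)).map (fun c => (PySem.Int.ofChars? [c]).getD 0) with hdb
    have hlen_da : da.length = n := by
      rw [hda, List.length_map, PySem.Chars.length_zfill]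
      simp only [hn]
      omega
    have hlen_db : db.length = n := by
      rw [hdb, List.length_map, PySem.Chars.length_zfill]
      simp only [hn]
      omega
    have hbnd : ∀ v ∈ da, 0 ≤ v ∧ v < base := by
      intro v hv
      rw [hda] at hv
      obtain ⟨c, hc, rfl⟩ := List.mem_map.1 hv
      rcases pvZfill_mem _ _ _ hc with h0 | hmem
      · subst h0
        refine ⟨by decide, ?_⟩
        have : (PySem.Int.ofChars? ['0']).getD 0 = 0 := by decide
        rw [this]; omega
      · obtain ⟨⟨h48, h57⟩, hlt⟩ := hda' c hmem
        rw [pvParse_digit c (pvChar_digit_mem c h48 h57)]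
        constructor
        · omega
        · exact hlt
    have hbnd' : ∀ v ∈ db, 0 ≤ v ∧ v < base := by
      intro v hv
      rw [hdb] at hv
      obtain ⟨c, hc, rfl⟩ := List.mem_map.1 hv
      rcases pvZfill_mem _ _ _ hc with h0 | hmem
      · subst h0
        refine ⟨by decide, ?_⟩
        have : (PySem.Int.ofChars? ['0']).getD 0 = 0 := by decide
        rw [this]; omega
      · obtain ⟨⟨h48, h57⟩, hlt⟩ := hdb' c hmem
        rw [pvParse_digit c (pvChar_digit_mem c h48 h57)]
        constructor
        · omega
        · exact hlt
    have hanyA : da.any (fun i => decide (base ≤ i)) = false := by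
      simp only [List.any_eq_false, decide_eq_true_eq]
      intro v hv
      exact not_le.2 (hbnd v hv).2
    have hanyB : db.any (fun i => decide (base ≤ i)) = false := by
      simp only [List.any_eq_false, decide_eq_true_eq]
      intro v hv
      exact not_le.2 (hbnd' v hv).2
    simp only [sum_numeral_sys, sum_numeral_sys_alt, hml, ← hda, ← hdb, hanyA, hanyB,
      Bool.or_self, Bool.false_eq_true, if_false]
    -- A's loop
    have hloop := pvLoopA base da db (by omega) 0 []
    rw [hlen_da] at hloop
    rw [hloop]
    set ps : List (Int × Int) := (da.zip db).reverse with hps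
    have hps_len : ps.length = n := by
      rw [hps, List.length_reverse, List.length_zip, hlen_da, hlen_db, Nat.min_self]
    have hps_bnd : ∀ p ∈ ps, 0 ≤ p.1 ∧ p.1 < base ∧ 0 ≤ p.2 ∧ p.2 < base := by
      intro p hp
      rw [hps, List.mem_reverse] at hp
      obtain ⟨x, y⟩ := p
      obtain ⟨h1, h2⟩ := List.of_mem_zip hp
      exact ⟨(hbnd x h1).1, (hbnd x h1).2, (hbnd' y h2).1, (hbnd' y h2).2⟩
    set N : Int := pvVal base ps with hN
    have hcs := pvCarry_spec base hb ps 0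
    rw [hps_len] at hcs
    simp only [zero_add] at hcs
    have hNbnd := pvVal_nonneg base ps hps_bnd hb
    rw [hps_len] at hNbnd
    -- B's number
    have hhorner : (da.zip db).foldl (fun acc p => acc * base + p.1 + p.2) 0 = N := by
      rw [pvHorner, hN, hps]
      simp
    rw [hhorner, hcs.1, hcs.2, List.nil_append]
    rw [PySem.List.slice?_none_none_neg_one, Option.getD_some]
    by_cases hlt : N < base ^ n
    · have ho : N / base ^ n = 0 := Int.ediv_eq_zero_of_lt hNbnd.1 hlt
      rw [ho, if_neg (by omega)]
      have hpad := pvToDigits_pad base hb n N hNbnd.1 hlt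
      have hlen_le : (pvToDigits N base).length ≤ n := by
        have := congrArg List.length hpad
        simp at this
        omega
      have hgen : ∀ (k l : Nat), ((k : Int) - (l : Int)).toNat = k - l := by
        intro k l; omega
      rw [hgen, hpad]
    · have hge : base ^ n ≤ N := by omega
      have hb2 : 1 < base := by
        by_contra hc
        have hbe : base = 1 := by omega
        have hp1 : base ^ n = 1 := by rw [hbe]; exact one_pow n
        have h2 := hNbnd.2
        rw [hp1] at hge h2
        omega
      have ho : N / base ^ n = 1 := by
        have h1 : 1 ≤ N / base ^ n := by
          rw [Int.le_ediv_iff_mul_le (pow_pos hb n)]; omega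
        have h2 : N / base ^ n < 2 := by
          rw [Int.ediv_lt_iff_lt_mul (pow_pos hb n)]; omega
        omega
      rw [ho, if_pos (by omega)]
      have htop := pvToDigits_top base hb2 n N hge (by omega)
      rw [htop]
      have hlen : ((List.range n).map (fun j => N / base ^ j % base) ++ [(1:Int)]).length
          = n + 1 := by simp
      rw [hlen]
      have hcnt : ((n : Int) - ((n + 1 : Nat) : Int)).toNat = 0 := by omega
      rw [hcnt, List.replicate_zero, List.append_nil]
  · -- both strings empty: every intermediate list is empty, both return []
    have hla : PySem.Str.len a = 0 := by rw [PySem.Str.len_eq, hae]; simp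
    have hlb : PySem.Str.len b = 0 := by rw [PySem.Str.len_eq, hbe]; simp
    have hz : PySem.Chars.zfill ([] : List Char) (0 : Int) = [] := by decide
    have ht0 : pvToDigits 0 base = [] := by
      rw [pvToDigits_eq, if_neg]
      rintro ⟨h, -⟩
      exact lt_irrefl 0 h
    have hr : PySem.List.pyRange ((0:Int) - 1) (-1) (-1) = [] :=
      PySem.List.pyRange_neg_one_eq_nil (by norm_num)
    simp [sum_numeral_sys, sum_numeral_sys_alt, hla, hlb, hae, hbe, hz, ht0, hr,
      PySem.List.slice?_none_none_neg_one]

-- ===== VERDICT (by name: the statement is the Claim_ definition above) =====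
theorem sum_numeral_sys_spec : Claim_equal_sum_numeral_sys := by
  intro a b base _ hpre
  unfold Spec_sum_numeral_sys
  exact pvMain a b base hpre
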